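-- pv_equiv track=rewrite | github.com/shivam-36/wordle-solver | neanderthal.py | get_word_map
-- ===== SOURCE A (Python) =====
-- def get_word_map(ip):
--     word_map = [{}, {}, {}, {}, {}]
--     for word in ip:
--         for i in range(0, 5):
--             if word[i] not in word_map[i]:
--                 word_map[i].update({word[i]: []})
--             word_map[i][word[i]].append(word)
--     return word_map
-- ===== SOURCE B (Python) =====
-- def get_word_map(ip):
--     # Letter-major grouping: for each position, first collect the distinct
--     # letters in first-occurrence order, then build each letter's group by
--     # filtering the whole input; no incremental per-word dict updates.
--     def groups(i):
--         letters = dict.fromkeys(w[i] for w in ip)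
--         return {c: [w for w in ip if w[i] == c] for c in letters}
--     return [groups(i) for i in range(5)]
-- ===== Notes on version B (the rewrite author's own statement) =====
-- stated objective: alternative
-- what changed: Replaces the single word-major pass that incrementally appends into five dicts with a letter-major strategy: per position it first computes the distinct letters in first-occurrence order (dict.fromkeys) and then materialises each letter's group by filtering the whole word list, so no dict is ever updated in place.
import Mathlib
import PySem

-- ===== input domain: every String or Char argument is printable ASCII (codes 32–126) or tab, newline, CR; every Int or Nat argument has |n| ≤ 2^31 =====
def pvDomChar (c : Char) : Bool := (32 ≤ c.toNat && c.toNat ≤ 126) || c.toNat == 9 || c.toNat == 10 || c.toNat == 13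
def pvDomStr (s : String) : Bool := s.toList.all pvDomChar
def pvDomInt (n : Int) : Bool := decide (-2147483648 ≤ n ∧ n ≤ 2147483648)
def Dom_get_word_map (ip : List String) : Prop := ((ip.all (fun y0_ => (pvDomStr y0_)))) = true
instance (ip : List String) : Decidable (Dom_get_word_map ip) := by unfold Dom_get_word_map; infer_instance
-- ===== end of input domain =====

-- B groups letter-major (distinct letters first, then one filter per letter) instead of A's
-- word-major pass that appends into five dicts; same return value on every input A accepts.

-- ===== PORT A =====
-- word[i] as a one-character string; "" stands for the IndexError case, which Pre_get_word_map excludes.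
def gwCharAt (word : String) (i : Int) : String :=
  match PySem.Str.pyGet? word i with
  | some c => String.ofList [c]
  | none => ""

-- one word of A's outer loop: 'for i in range(0,5): if word[i] not in word_map[i]: update; append'
def gwStepA (wm : List (PySem.Dict String (List String))) (word : String) :
    List (PySem.Dict String (List String)) :=
  (PySem.List.pyRange 0 5 1).foldl (fun wm i =>
    let d := PySem.List.pyGetD wm i PySem.Dict.empty
    let c := gwCharAt word i
    let d := if d.contains c then d else d.insert c ([] : List String)
    PySem.List.pySetD wm i (d.modify c [] (· ++ [word]))) wm

def get_word_map (ip : List String) : List (List (String × List String)) :=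
  (ip.foldl gwStepA
    [PySem.Dict.empty, PySem.Dict.empty, PySem.Dict.empty, PySem.Dict.empty, PySem.Dict.empty]).map
    PySem.Dict.items

-- ===== PORT B =====
-- 'letters = dict.fromkeys(w[i] for w in ip)' is the ordered dedup of the position-i letters;
-- the dict comprehension over those (distinct) letters is the insertion-ordered dict of its pairs.
def gwGroups (ip : List String) (i : Int) : List (String × List String) :=
  (PySem.Dict.ofList
    ((PySem.List.dedup (ip.map (fun w => gwCharAt w i))).map
      (fun c => (c, ip.filter (fun w => gwCharAt w i == c))))).items

def get_word_map_alt (ip : List String) : List (List (String × List String)) :=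
  (PySem.List.pyRange 0 5 1).map (fun i => gwGroups ip i)

-- ===== PRECONDITION & SPEC =====
-- Pre_ excludes inputs containing a word shorter than 5 characters, on which A raises IndexError (word[i]).
def Pre_get_word_map (ip : List String) : Prop := ∀ w ∈ ip, 5 ≤ w.toList.length
instance (ip : List String) : Decidable (Pre_get_word_map ip) := by unfold Pre_get_word_map; infer_instance
def pvWitness_get_word_map : List String := ["crane", "slate", "caret"]

def Spec_get_word_map (ip : List String) (out : List (List (String × List String))) : Prop := out = get_word_map_alt ip
instance (ip : List String) (out : List (List (String × List String))) : Decidable (Spec_get_word_map ip out) := by unfold Spec_get_word_map; infer_instance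

-- ===== CLAIM (what is proved, stated in full; the proofs are below) =====
def Claim_equal_get_word_map : Prop := ∀ (ip : List String), Dom_get_word_map ip → Pre_get_word_map ip → Spec_get_word_map ip (get_word_map ip)

-- ===== LEMMAS AND PROOFS =====

-- A's per-word update at one position, as a single-dict step
def gwStepB (i : Int) (d : PySem.Dict String (List String)) (w : String) :
    PySem.Dict String (List String) :=
  let c := gwCharAt w i
  (if d.contains c then d else d.insert c ([] : List String)).modify c [] (· ++ [w])

-- one word of A's lockstep pass acts componentwise on the five dicts
lemma gwStepA_componentwise (word : String) (a b c d e : PySem.Dict String (List String)) :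
    gwStepA [a, b, c, d, e] word =
      [gwStepB 0 a word, gwStepB 1 b word, gwStepB 2 c word, gwStepB 3 d word, gwStepB 4 e word] := by
  simp [gwStepA, gwStepB, show PySem.List.pyRange 0 5 1 = [0, 1, 2, 3, 4] from rfl,
    PySem.List.pyGetD, PySem.List.pyIdx?, PySem.List.pySetD, PySem.List.pySet?]

-- the whole lockstep fold is five independent folds
lemma gwFold_componentwise (ip : List String) (a b c d e : PySem.Dict String (List String)) :
    ip.foldl gwStepA [a, b, c, d, e] =
      [ip.foldl (gwStepB 0) a, ip.foldl (gwStepB 1) b, ip.foldl (gwStepB 2) c,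
       ip.foldl (gwStepB 3) d, ip.foldl (gwStepB 4) e] := by
  induction ip generalizing a b c d e with
  | nil => rfl
  | cons w ws ih => simp only [List.foldl_cons, gwStepA_componentwise, ih]

-- A's membership-test-plus-update-plus-append is a single modify
lemma gwStepB_eq_modify (i : Int) (d : PySem.Dict String (List String)) (w : String) :
    gwStepB i d w = d.modify (gwCharAt w i) [] (· ++ [w]) := by
  unfold gwStepB
  set c := gwCharAt w i with hc
  by_cases h : d.contains c
  · simp [h]
  · have hnk : c ∉ d.keys := by
      simpa [PySem.Dict.contains_iff_mem_keys] using h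
    have hfind : List.find? (fun p => p.1 == c) d.items = none := by
      rw [List.find?_eq_none]
      intro p hp
      have hmem : p.1 ∈ d.keys := by
        simp [PySem.Dict.keys]; exact ⟨p.2, by simpa using hp⟩
      simp; intro hk; exact absurd (hk ▸ hmem) hnk
    simp [h, PySem.Dict.modify, PySem.Dict.insert, PySem.Dict.getD, PySem.Dict.get?, hfind]
    apply List.map_congr_left ?_ |>.trans (List.map_id _)
    intro p hp
    have hmem : p.1 ∈ d.keys := by
      simp [PySem.Dict.keys]; exact ⟨p.2, by simpa using hp⟩
    simp; intro hk; exact absurd (hk ▸ hmem) hnk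

-- one position of A's fold has exactly B's items
lemma gwFold_items (ip : List String) (i : Int) :
    (ip.foldl (gwStepB i) PySem.Dict.empty).items = gwGroups ip i := by
  -- A's fold, as a fold over (key, word) pairs built of single modifies
  have hfold : ip.foldl (gwStepB i) PySem.Dict.empty
      = (ip.map (fun w => (gwCharAt w i, w))).foldl
          (fun d p => d.modify p.1 [] (· ++ [p.2])) PySem.Dict.empty := by
    have hs : gwStepB i = fun d w => d.modify (gwCharAt w i) [] (· ++ [w]) := by
      funext d w; exact gwStepB_eq_modify i d w
    rw [hs, List.foldl_map]
  have hkeys : (ip.foldl (gwStepB i) PySem.Dict.empty).keys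
      = PySem.List.dedup (ip.map (fun w => gwCharAt w i)) := by
    rw [hfold, PySem.Dict.keys_foldl_modify_key]
    simp [PySem.Set.update_nil_left, List.map_map, Function.comp_def]
  have hnd : (ip.foldl (gwStepB i) PySem.Dict.empty).keys.Nodup := by
    rw [hkeys]; exact PySem.List.nodup_dedup _
  have hgetD : ∀ c, (ip.foldl (gwStepB i) PySem.Dict.empty).getD c []
      = ip.filter (fun w => gwCharAt w i == c) := by
    intro c
    rw [hfold, PySem.Dict.getD_foldl_modify_append]
    simp [List.filter_map, List.map_map, Function.comp_def]
  -- B's side: the dict comprehension over distinct keys has exactly its pairs as items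
  have hB : gwGroups ip i
      = (PySem.List.dedup (ip.map (fun w => gwCharAt w i))).map
          (fun c => (c, ip.filter (fun w => gwCharAt w i == c))) := by
    have h := PySem.Dict.items_foldl_insert_fresh
      (PySem.List.dedup (ip.map (fun w => gwCharAt w i)))
      (fun c => c) (fun c => ip.filter (fun w => gwCharAt w i == c)) PySem.Dict.empty
      (fun a _ => by simp) (by simpa using PySem.List.nodup_dedup (ip.map (fun w => gwCharAt w i)))
    unfold gwGroups
    rw [show PySem.Dict.ofList
        ((PySem.List.dedup (ip.map (fun w => gwCharAt w i))).map
          (fun c => (c, ip.filter (fun w => gwCharAt w i == c))))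
      = ((PySem.List.dedup (ip.map (fun w => gwCharAt w i))).map
          (fun c => (c, ip.filter (fun w => gwCharAt w i == c)))).foldl
            (fun d p => d.insert p.1 p.2) PySem.Dict.empty from rfl]
    rw [List.foldl_map]
    exact h.trans (by simp [PySem.Dict.empty])
  rw [PySem.Dict.items_eq_map_keys _ hnd ([] : List String), hkeys, hB]
  apply List.map_congr_left
  intro c _
  rw [hgetD]

-- ===== VERDICT (by name: the statement is the Claim_ definition above) =====
theorem get_word_map_spec : Claim_equal_get_word_map := by
  intro ip _ _
  show get_word_map ip = get_word_map_alt ip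
  unfold get_word_map get_word_map_alt
  rw [gwFold_componentwise]
  rw [show PySem.List.pyRange 0 5 1 = [0, 1, 2, 3, 4] from rfl]
  simp [gwFold_items]
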